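-- pv_equiv track=rewrite | github.com/chen759281714/WIP-aware | src/algorithms/emt_glocal_ga_v2.py | find_os_position_of_operation
-- ===== SOURCE A (Python) =====
-- from typing import List, Optional, Dict, Any, Tuple
--
-- def find_os_position_of_operation(os_seq: List[str], job: str, op_idx: int) -> Optional[int]:
--     """
--     在 job-based OS 中，第 op_idx 道工序对应的是该 job 第 op_idx+1 次出现的位置
--     """
--     count = 0
--     for pos, g in enumerate(os_seq):
--         if g == job:
--             if count == op_idx:
--                 return pos
--             count += 1
--     return None
-- ===== SOURCE B (Python) =====
-- def find_os_position_of_operation(os_seq, job, op_idx):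
--     if op_idx < 0:
--         return None
--     pos = -1
--     try:
--         for _ in range(op_idx + 1):
--             pos = os_seq.index(job, pos + 1)
--     except ValueError:
--         return None
--     return pos
-- ===== Notes on version B (the rewrite author's own statement) =====
-- stated objective: idiomatic
-- what changed: Replaces A's enumerate-and-count scan over every element by op_idx+1 staged list.index(job, start) searches, each resuming just past the previous occurrence, with ValueError signalling too few occurrences.
import Mathlib
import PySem

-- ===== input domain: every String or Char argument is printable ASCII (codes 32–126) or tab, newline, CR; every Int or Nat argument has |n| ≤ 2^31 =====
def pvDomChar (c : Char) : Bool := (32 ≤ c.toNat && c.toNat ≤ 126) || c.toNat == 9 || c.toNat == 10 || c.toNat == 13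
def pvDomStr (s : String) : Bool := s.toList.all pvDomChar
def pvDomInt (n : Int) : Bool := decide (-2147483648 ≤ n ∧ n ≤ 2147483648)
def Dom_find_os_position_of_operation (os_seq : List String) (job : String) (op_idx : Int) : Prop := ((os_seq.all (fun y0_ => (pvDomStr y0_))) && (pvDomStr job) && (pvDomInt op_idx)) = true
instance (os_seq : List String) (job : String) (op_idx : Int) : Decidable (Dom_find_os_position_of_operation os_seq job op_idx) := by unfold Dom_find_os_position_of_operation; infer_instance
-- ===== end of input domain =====

-- B replaces A's enumerate-and-count scan by op_idx+1 staged list.index(job, start) searches,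
-- each resuming just past the previous occurrence (alternative decomposition, same cost).

-- ===== PORT A =====
-- A's for-loop over enumerate(os_seq) with the running counter and early return
def pvLoopA (job : String) (op_idx : Int) : List (Int × String) → Int → Option Int
  | [], _ => none
  | (pos, g) :: rest, count =>
      if g == job then
        if count == op_idx then some pos else pvLoopA job op_idx rest (count + 1)
      else pvLoopA job op_idx rest count

def find_os_position_of_operation (os_seq : List String) (job : String) (op_idx : Int) : Option Int :=
  pvLoopA job op_idx (PySem.List.enumerate os_seq 0) 0

-- ===== PORT B =====
-- hand port of Python's list.index(v, start) for start ≥ 0 (the only way B calls it):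
-- first position ≥ start holding v, ValueError → none; exact on that domain
def pvIndexFrom (os : List String) (job : String) (start : Int) : Option Int :=
  (PySem.List.index? (os.drop start.toNat) job).map (fun j => start + (j : Int))

-- B's `for _ in range(op_idx + 1)` with the try/except early exit, as fuel recursion
def pvLoopB (os : List String) (job : String) : Nat → Int → Option Int
  | 0, pos => some pos
  | k + 1, pos =>
      match pvIndexFrom os job (pos + 1) with
      | none => none
      | some p => pvLoopB os job k p

def find_os_position_of_operation_alt (os_seq : List String) (job : String) (op_idx : Int) : Option Int :=
  if op_idx < 0 then none
  else pvLoopB os_seq job (op_idx + 1).toNat (-1)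

-- ===== PRECONDITION & SPEC =====
def Spec_find_os_position_of_operation (os_seq : List String) (job : String) (op_idx : Int) (out : Option Int) : Prop := out = find_os_position_of_operation_alt os_seq job op_idx
instance (os_seq : List String) (job : String) (op_idx : Int) (out : Option Int) : Decidable (Spec_find_os_position_of_operation os_seq job op_idx out) := by unfold Spec_find_os_position_of_operation; infer_instance

-- ===== CLAIM (what is proved, stated in full; the proofs are below) =====
def Claim_equal_find_os_position_of_operation : Prop := ∀ (os_seq : List String) (job : String) (op_idx : Int), Dom_find_os_position_of_operation os_seq job op_idx → Spec_find_os_position_of_operation os_seq job op_idx (find_os_position_of_operation os_seq job op_idx)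

-- ===== LEMMAS AND PROOFS =====

-- reference function: position of the (k+1)-th occurrence of job
def nthOcc (job : String) : List String → Nat → Option Nat
  | [], _ => none
  | g :: rest, k =>
      if g == job then
        if k = 0 then some 0 else (nthOcc job rest (k - 1)).map (· + 1)
      else (nthOcc job rest k).map (· + 1)

-- when the counter has already passed op_idx, A's loop can never fire and returns none
theorem pvLoopA_none (job : String) (op_idx : Int) :
    ∀ (l : List (Int × String)) (count : Int), op_idx < count →
      pvLoopA job op_idx l count = none := by
  intro l
  induction l with
  | nil => intro count _; rfl
  | cons p rest ih =>
      intro count h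
      obtain ⟨pos, g⟩ := p
      simp only [pvLoopA]
      split_ifs with hg hc
      · exact absurd (by exact_mod_cast (beq_iff_eq.mp hc)) (by omega)
      · exact ih (count + 1) (by omega)
      · exact ih count h

-- A's scan from counter `count` returns the (op_idx - count)-th occurrence, offset by n
theorem pvLoopA_eq_nth (job : String) (op_idx : Int) :
    ∀ (os : List String) (n count : Int), count ≤ op_idx →
      pvLoopA job op_idx (PySem.List.enumerate os n) count =
        (nthOcc job os (op_idx - count).toNat).map (fun p => n + (p : Int)) := by
  intro os
  induction os with
  | nil => intro n count _; rfl
  | cons g rest ih =>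
      intro n count h
      rw [PySem.List.enumerate_cons]
      simp only [pvLoopA, nthOcc]
      by_cases hgg : g = job
      · have hg' : (g == job) = true := beq_iff_eq.mpr hgg
        rw [if_pos hg', if_pos hg']
        by_cases hc : count = op_idx
        · have hc' : (count == op_idx) = true := beq_iff_eq.mpr hc
          have h0 : (op_idx - count).toNat = 0 := by omega
          rw [if_pos hc', h0, if_pos rfl]
          simp
        · have hc' : ¬ (count == op_idx) = true := by simp [hc]
          have hk : (op_idx - count).toNat = ((op_idx - (count + 1)).toNat) + 1 := by omega
          rw [if_neg hc', hk, if_neg (by omega : ¬ (op_idx - (count + 1)).toNat + 1 = 0)]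
          rw [ih (n + 1) (count + 1) (by omega)]
          simp only [Nat.add_sub_cancel]
          cases nthOcc job rest (op_idx - (count + 1)).toNat with
          | none => simp
          | some p => simp; ring
      · have hg' : ¬ (g == job) = true := by simp [hgg]
        rw [if_neg hg', if_neg hg', ih (n + 1) count h]
        cases nthOcc job rest (op_idx - count).toNat with
        | none => simp
        | some p => simp; ring

theorem nthOcc_of_not_mem (job : String) :
    ∀ (os : List String), job ∉ os → ∀ k, nthOcc job os k = none := by
  intro os
  induction os with
  | nil => intro _ k; rfl
  | cons g rest ih =>
      intro h k
      have hg : ¬ (g == job) = true := by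
        simp only [beq_iff_eq]; intro e; exact h (by simp [e])
      have hrest : job ∉ rest := fun hm => h (List.mem_cons_of_mem _ hm)
      simp only [nthOcc, if_neg hg, ih hrest, Option.map_none]

theorem nthOcc_zero_eq_index? (job : String) :
    ∀ (os : List String), nthOcc job os 0 = PySem.List.index? os job := by
  intro os
  induction os with
  | nil => rfl
  | cons g rest ih =>
      by_cases hg : g = job
      · subst hg
        rw [PySem.List.index?_cons_self]
        simp [nthOcc]
      · rw [PySem.List.index?_cons_of_ne rest hg, ← ih]
        simp only [nthOcc, if_neg (by simp [hg] : ¬ (g == job) = true)]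

theorem nthOcc_succ_of_index? (job : String) :
    ∀ (os : List String) (i : Nat), PySem.List.index? os job = some i →
      ∀ k, nthOcc job os (k + 1) = (nthOcc job (os.drop (i + 1)) k).map (· + (i + 1)) := by
  intro os
  induction os with
  | nil => intro i h k; simp [PySem.List.index?] at h
  | cons g rest ih =>
      intro i h k
      by_cases hg : g = job
      · subst hg
        rw [PySem.List.index?_cons_self] at h
        obtain rfl : i = 0 := by simpa using h.symm
        simp [nthOcc]
      · rw [PySem.List.index?_cons_of_ne rest hg] at h
        cases hr : PySem.List.index? rest job with
        | none => rw [hr] at h; simp at h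
        | some j =>
            rw [hr] at h
            obtain rfl : i = j + 1 := by simpa using h.symm
            have hdrop : List.drop (j + 1 + 1) (g :: rest) = List.drop (j + 1) rest := rfl
            rw [hdrop]
            simp only [nthOcc, if_neg (by simp [hg] : ¬ (g == job) = true), ih j hr k]
            cases nthOcc job (List.drop (j + 1) rest) k with
            | none => simp
            | some p => simp; omega

-- B's staged-index loop computes the k-th occurrence after position pos
theorem pvLoopB_eq_nth (os : List String) (job : String) :
    ∀ (k : Nat) (pos : Int), -1 ≤ pos →
      pvLoopB os job (k + 1) pos =
        (nthOcc job (os.drop (pos + 1).toNat) k).map (fun p => pos + 1 + (p : Int)) := by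
  intro k
  induction k with
  | zero =>
      intro pos _
      simp only [pvLoopB, pvIndexFrom, nthOcc_zero_eq_index?]
      cases PySem.List.index? (os.drop (pos + 1).toNat) job with
      | none => rfl
      | some j => simp
  | succ m ih =>
      intro pos hpos
      have hstep : pvLoopB os job (m + 1 + 1) pos =
          match pvIndexFrom os job (pos + 1) with
          | none => none
          | some p => pvLoopB os job (m + 1) p := rfl
      rw [hstep]
      cases hidx : PySem.List.index? (os.drop (pos + 1).toNat) job with
      | none =>
          have h1 : pvIndexFrom os job (pos + 1) = none := by
            simp only [pvIndexFrom, hidx]; rfl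
          rw [h1, nthOcc_of_not_mem job _ ((PySem.List.index?_eq_none_iff _ _).mp hidx)]
          rfl
      | some j =>
          have h1 : pvIndexFrom os job (pos + 1) = some (pos + 1 + (j : Int)) := by
            simp only [pvIndexFrom, hidx]; rfl
          simp only [h1]
          rw [ih (pos + 1 + (j : Int)) (by omega)]
          rw [nthOcc_succ_of_index? job _ j hidx m]
          have hdrop : (os.drop (pos + 1).toNat).drop (j + 1)
              = os.drop ((pos + 1 + (j : Int)) + 1).toNat := by
            rw [List.drop_drop]
            congr 1
            omega
          rw [hdrop]
          cases nthOcc job (os.drop ((pos + 1 + (j : Int)) + 1).toNat) m with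
          | none => rfl
          | some p => simp; ring

-- ===== VERDICT (by name: the statement is the Claim_ definition above) =====
theorem find_os_position_of_operation_spec : Claim_equal_find_os_position_of_operation := by
  intro os_seq job op_idx _
  unfold Spec_find_os_position_of_operation find_os_position_of_operation find_os_position_of_operation_alt
  by_cases h0 : op_idx < 0
  · rw [pvLoopA_none job op_idx _ 0 (by omega), if_pos h0]
  · rw [pvLoopA_eq_nth job op_idx os_seq 0 0 (by omega), if_neg h0]
    have hk : (op_idx + 1).toNat = (op_idx - 0).toNat + 1 := by omega
    rw [hk, pvLoopB_eq_nth os_seq job _ (-1) (by omega)]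
    simp
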